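-- pv_equiv track=rewrite | github.com/sin471/procon-archive | atcoder.jp/abc252/abc252_c/Main.py | solve_overlap
-- ===== SOURCE A (Python) =====
-- def solve_overlap(t_list):
--     #重複があった場合、リールをn周(+10n)させる
--     overlap_cnt_list = [0] * 10
--
--     for i,ele in enumerate(t_list):
--
--         overlap_cnt = overlap_cnt_list[ele]
--         if overlap_cnt:
--             t_list[i] += 10 * overlap_cnt
--
--         overlap_cnt_list[ele] += 1
--     return t_list
-- ===== SOURCE B (Python) =====
-- def solve_overlap(t_list):
--     # Group-by-value strategy: collect the positions of each digit in one pass,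
--     # then spin each digit's k-th occurrence k extra reel turns (+10*k),
--     # mutating t_list in place like the original.
--     groups = {}
--     for i, x in enumerate(t_list):
--         groups.setdefault(x, []).append(i)
--     for idxs in groups.values():
--         for k, i in enumerate(idxs):
--             t_list[i] += 10 * k
--     return t_list
-- ===== Notes on version B (the rewrite author's own statement) =====
-- stated objective: alternative
-- what changed: B replaces A's single pass with a running 10-slot counter table by a two-phase group-by: one pass collects each value's list of positions into a dict, then each group's k-th occurrence gets +10*k written back by scattered index assignment.
-- intended difference: On lists containing two distinct values congruent mod 10 (only possible with negative digits, witness input [-1, 9]), A's negative-index wraparound makes them share a counter slot so A adds a spurious 10 to the later one (returning -1 then 19), while B groups by exact value and leaves both unchanged, the intended one-extra-reel-turn-per-duplicate behaviour. — e.g. on solve_overlap([-1, 9]): A returns [-1, 19], B returns [-1, 9]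
import Mathlib
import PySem

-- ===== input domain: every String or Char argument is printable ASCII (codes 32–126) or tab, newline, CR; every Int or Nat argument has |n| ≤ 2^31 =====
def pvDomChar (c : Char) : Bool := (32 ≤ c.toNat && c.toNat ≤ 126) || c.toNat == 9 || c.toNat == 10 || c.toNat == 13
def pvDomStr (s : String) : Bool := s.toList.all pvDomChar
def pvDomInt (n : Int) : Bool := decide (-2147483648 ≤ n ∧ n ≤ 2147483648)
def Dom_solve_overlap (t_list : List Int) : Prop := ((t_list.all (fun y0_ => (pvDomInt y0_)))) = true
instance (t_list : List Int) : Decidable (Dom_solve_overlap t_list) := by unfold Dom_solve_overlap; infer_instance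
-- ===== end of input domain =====

-- B replaces A's one-pass running counter table by a two-phase group-by: collect
-- each value's positions into a dict, then write +10*k to each group's k-th
-- occurrence. NOTE: both A and B mutate t_list in place in Python; the
-- equivalence proved here is about the RETURN value only.

-- ===== PORT A =====
-- A's loop: running counter list, in-place bump of the current element.
-- The counter read/write uses pyGetD/pySetD (total forms); Pre_ keeps every
-- element between -10 and 9, exactly where Python's overlap_cnt_list[ele] does not raise.
def solveOverlapLoopA (cnts : List Int) (acc : List Int) : List (Int × Int) → List Int
  | [] => acc.reverse
  | (_, ele) :: rest =>
    let overlap_cnt := PySem.List.pyGetD cnts ele 0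
    let newEle := if overlap_cnt ≠ 0 then ele + 10 * overlap_cnt else ele
    solveOverlapLoopA (PySem.List.pySetD cnts ele (overlap_cnt + 1)) (newEle :: acc) rest

def solve_overlap (t_list : List Int) : List Int :=
  solveOverlapLoopA (List.replicate 10 0) [] (PySem.List.enumerate t_list 0)

-- ===== PORT B =====
-- first pass: groups.setdefault(x, []).append(i)  ==  modify x [] (· ++ [i])
-- second pass: for k, i in enumerate(idxs): t_list[i] += 10 * k
def solveOverlapGroupB (acc : List Int) : List (Int × Int) → List Int
  | [] => acc
  | (k, i) :: rest =>
    solveOverlapGroupB (PySem.List.pySetD acc i (PySem.List.pyGetD acc i 0 + 10 * k)) rest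

def solve_overlap_alt (t_list : List Int) : List Int :=
  let groups := (PySem.List.enumerate t_list 0).foldl
    (fun d p => d.modify p.2 [] (· ++ [p.1])) PySem.Dict.empty
  groups.values.foldl (fun acc idxs => solveOverlapGroupB acc (PySem.List.enumerate idxs 0)) t_list

-- ===== PRECONDITION & SPEC =====
-- Pre_ is exactly where Python A returns: any element below -10 or above 9 makes
-- overlap_cnt_list[ele] raise IndexError.
def Pre_solve_overlap (t_list : List Int) : Prop :=
  ∀ x ∈ t_list, -10 ≤ x ∧ x < 10

instance (t_list : List Int) : Decidable (Pre_solve_overlap t_list) := by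
  unfold Pre_solve_overlap; infer_instance

def pvWitness_solve_overlap : List Int := [1, 3, 1, 1]

-- A indexes its 10-slot counter with the raw element, so a negative digit d
-- shares a counter slot with d+10 (negative-index wraparound): on lists holding
-- two distinct values that are congruent mod 10, A bumps later occurrences as if
-- they were duplicates; B groups by exact value, which is the intended
-- "spin the reel once per duplicate" behaviour.
def D_solve_overlap (t_list : List Int) : Prop :=
  ∃ x ∈ t_list, ∃ y ∈ t_list, x ≠ y ∧ x % 10 = y % 10

instance (t_list : List Int) : Decidable (D_solve_overlap t_list) := by
  unfold D_solve_overlap; infer_instance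

def Spec_solve_overlap (t_list : List Int) (out : List Int) : Prop :=
  ¬ D_solve_overlap t_list → out = solve_overlap_alt t_list

instance (t_list : List Int) (out : List Int) : Decidable (Spec_solve_overlap t_list out) := by
  unfold Spec_solve_overlap; infer_instance

def pvDiffWitness_solve_overlap : List Int := [-1, 9]
def pvDiffWitnessOut_solve_overlap : (List Int) × (List Int) := ([-1, 19], [-1, 9])

-- ===== CLAIM (what is proved, stated in full; the proofs are below) =====
def Claim_unchanged_solve_overlap : Prop := ∀ (t_list : List Int), Dom_solve_overlap t_list → Pre_solve_overlap t_list → Spec_solve_overlap t_list (solve_overlap t_list)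
def Claim_changed_solve_overlap : Prop := Dom_solve_overlap (pvDiffWitness_solve_overlap) ∧ Pre_solve_overlap (pvDiffWitness_solve_overlap) ∧ D_solve_overlap (pvDiffWitness_solve_overlap) ∧ solve_overlap (pvDiffWitness_solve_overlap) = pvDiffWitnessOut_solve_overlap.1 ∧ solve_overlap_alt (pvDiffWitness_solve_overlap) = pvDiffWitnessOut_solve_overlap.2 ∧ pvDiffWitnessOut_solve_overlap.1 ≠ pvDiffWitnessOut_solve_overlap.2
def Claim_exact_solve_overlap : Prop := ∀ (t_list : List Int), Dom_solve_overlap t_list → Pre_solve_overlap t_list → D_solve_overlap t_list → solve_overlap t_list ≠ solve_overlap_alt t_list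

-- ===== LEMMAS AND PROOFS =====

/-- Counter table after processing `pre`: slot `s` holds how many processed
elements are ≡ s (mod 10). -/
def cntsOf (pre : List Int) : List Int :=
  (List.range 10).map (fun s : Nat => (pre.countP (fun y => y % 10 == (s : Int)) : Int))

/-- Reference form of A: element gets 10 × (number of earlier elements with the
same residue mod 10). -/
def goA (pre : List Int) : List Int → List Int
  | [] => []
  | x :: rest =>
      (x + 10 * (pre.countP (fun y => y % 10 == x % 10) : Int)) :: goA (pre ++ [x]) rest

/-- Reference form of B: element gets 10 × (number of equal earlier elements). -/
def goB (pre : List Int) : List Int → List Int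
  | [] => []
  | x :: rest => (x + 10 * (pre.count x : Int)) :: goB (pre ++ [x]) rest

lemma cntsOf_nil : cntsOf [] = List.replicate 10 0 := by decide

lemma length_cntsOf (pre : List Int) : (cntsOf pre).length = 10 := by
  simp [cntsOf]

lemma cntsOf_getElem (pre : List Int) (j : Nat) (hj : j < 10) :
    (cntsOf pre)[j]'(by rw [length_cntsOf]; exact hj)
      = (pre.countP (fun y => y % 10 == (j : Int)) : Int) := by
  unfold cntsOf
  rw [List.getElem_map, List.getElem_range]

lemma cntsOf_get (pre : List Int) (ele : Int) (_h1 : -10 ≤ ele) (h2 : ele < 10) :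
    PySem.List.pyGetD (cntsOf pre) ele 0
      = (pre.countP (fun y => y % 10 == ele % 10) : Int) := by
  have hlen := length_cntsOf pre
  by_cases hpos : 0 ≤ ele
  · rw [PySem.List.pyGetD_eq_getElem _ _ hpos (by rw [hlen]; push_cast; omega)]
    rw [cntsOf_getElem pre ele.toNat (by omega)]
    rw [show ((ele.toNat : Nat) : Int) = ele % 10 by omega]
  · have hpg := PySem.List.pyGetD_neg_natCast (cntsOf pre) (-ele).toNat 0 (by omega)
      (by rw [hlen]; omega)
    rw [show (-(((-ele).toNat : Nat) : Int)) = ele by omega] at hpg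
    rw [hpg]
    simp only [hlen]
    rw [cntsOf_getElem pre _ (by omega)]
    rw [show (((10 - (-ele).toNat : Nat)) : Int) = ele % 10 by omega]

-- pySetD on an in-range index of a length-10 list, unfolding the primitive
-- (pySetD/pySet?/pyIdx? have no negative-numeral lemma in the prelude).
lemma pySetD_len10 (xs : List Int) (hlen : xs.length = 10) (i : Int) (v : Int)
    (h1 : -10 ≤ i) (h2 : i < 10) :
    PySem.List.pySetD xs i v = xs.set (i % 10).toNat v := by
  simp only [PySem.List.pySetD, PySem.List.pySet?, PySem.List.pyIdx?, hlen]
  by_cases hpos : 0 ≤ i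
  · rw [if_pos hpos, if_pos (by exact_mod_cast h2)]
    simp only [Option.map_some, Option.getD_some]
    congr 1
    omega
  · rw [if_neg hpos, if_pos (by push_cast; omega)]
    simp only [Option.map_some, Option.getD_some]
    congr 1
    omega

lemma cntsOf_set (pre : List Int) (ele : Int) (h1 : -10 ≤ ele) (h2 : ele < 10) :
    PySem.List.pySetD (cntsOf pre) ele
        ((pre.countP (fun y => y % 10 == ele % 10) : Int) + 1)
      = cntsOf (pre ++ [ele]) := by
  rw [pySetD_len10 _ (length_cntsOf pre) _ _ h1 h2]
  apply List.ext_getElem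
  · simp [cntsOf]
  · intro j hj1 hj2
    have hj : j < 10 := by rw [List.length_set, length_cntsOf] at hj1; exact hj1
    rw [List.getElem_set]
    by_cases hje : (ele % 10).toNat = j
    · rw [if_pos hje, cntsOf_getElem _ j hj]
      have hc : ((j : Nat) : Int) = ele % 10 := by omega
      rw [hc, List.countP_append]
      have h1 : List.countP (fun y => y % 10 == ele % 10) [ele] = 1 := by
        simp
      rw [h1]
      push_cast
      ring
    · rw [if_neg hje, cntsOf_getElem _ j hj, cntsOf_getElem _ j hj, List.countP_append]
      have h0 : List.countP (fun y => y % 10 == ((j : Nat) : Int)) [ele] = 0 := by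
        have : (ele % 10 == ((j : Nat) : Int)) = false := by
          simp only [beq_eq_false_iff_ne, ne_eq]
          omega
        simp [this]
      rw [h0]
      simp

lemma loopA_eq (rest : List Int) :
    ∀ (pre acc : List Int) (n : Int), (∀ x ∈ rest, -10 ≤ x ∧ x < 10) →
      solveOverlapLoopA (cntsOf pre) acc (PySem.List.enumerate rest n)
        = acc.reverse ++ goA pre rest := by
  induction rest with
  | nil => intro pre acc n _; simp [PySem.List.enumerate, solveOverlapLoopA, goA]
  | cons x rest ih =>
    intro pre acc n hr
    have hx := hr x (by simp)
    rw [PySem.List.enumerate_cons]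
    simp only [solveOverlapLoopA]
    rw [cntsOf_get pre x hx.1 hx.2, cntsOf_set pre x hx.1 hx.2,
      ih (pre ++ [x]) _ (n + 1) (fun y hy => hr y (by simp [hy]))]
    simp only [goA, List.reverse_cons, List.append_assoc, List.cons_append,
      List.nil_append]
    congr 2
    by_cases hc : (pre.countP (fun y => y % 10 == x % 10) : Int) ≠ 0
    · simp
    · simp only [not_not] at hc
      simp

lemma portA_eq_goA (t : List Int) (h : ∀ x ∈ t, -10 ≤ x ∧ x < 10) :
    solve_overlap t = goA [] t := by
  have := loopA_eq t [] [] 0 h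
  rw [cntsOf_nil] at this
  simpa [solve_overlap] using this

-- ---------- B-side: the group-by dict and the scattered writes ----------

/-- The positions (as Python ints) at which `v` occurs in `t`. -/
def idxList (t : List Int) (v : Int) : List Int :=
  ((PySem.List.enumerate t 0).filter (fun p => p.2 == v)).map Prod.fst

lemma mem_idxList (t : List Int) (v i : Int) :
    i ∈ idxList t v ↔ ∃ (k : Nat) (_ : k < t.length), i = (k : Int) ∧ t[k] = v := by
  simp only [idxList, List.mem_map, List.mem_filter, PySem.List.mem_enumerate_iff]
  constructor
  · rintro ⟨p, ⟨⟨k, hk, rfl⟩, hv⟩, rfl⟩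
    exact ⟨k, hk, by simp, by simpa using hv⟩
  · rintro ⟨k, hk, rfl, hv⟩
    exact ⟨((k : Int), t[k]), ⟨⟨k, hk, by simp⟩, by simpa using hv⟩, rfl⟩

lemma pairwise_idxList (t : List Int) (v : Int) :
    (idxList t v).Pairwise (· < ·) := by
  exact (List.Pairwise.filter _ (PySem.List.pairwise_lt_enumerate t 0)).map _ (fun _ _ h => h)

lemma countP_snd_enumerate (xs : List Int) (v : Int) :
    ∀ s : Int, (PySem.List.enumerate xs s).countP (fun p => p.2 == v) = xs.count v := by
  induction xs with
  | nil => intro s; simp [PySem.List.enumerate]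
  | cons x xs ih =>
    intro s
    rw [PySem.List.enumerate_cons, List.countP_cons, List.count_cons, ih (s + 1)]

lemma countP_idxList (t : List Int) (v : Int) (j : Nat) (hj : j ≤ t.length) :
    (idxList t v).countP (fun i => i < (j : Int)) = (t.take j).count v := by
  unfold idxList
  rw [List.countP_map, List.countP_filter]
  conv_lhs => rw [← List.take_append_drop j t, PySem.List.enumerate_append]
  rw [List.countP_append]
  have h1 : (PySem.List.enumerate (t.take j) 0).countP
      (fun a => ((fun i => decide (i < (j : Int))) ∘ Prod.fst) a && a.2 == v)
      = (t.take j).count v := by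
    rw [← countP_snd_enumerate (t.take j) v 0]
    apply List.countP_congr
    intro p hp
    obtain ⟨k, hk, rfl⟩ := (PySem.List.mem_enumerate_iff _ _ _).1 hp
    have hkj : k < j := by simp only [List.length_take] at hk; omega
    simp only [Function.comp_apply, Bool.and_eq_true, decide_eq_true_eq]
    constructor
    · rintro ⟨_, h⟩; exact h
    · intro h; exact ⟨by omega, h⟩
  have h2 : (PySem.List.enumerate (t.drop j) (0 + ((t.take j).length : Int))).countP
      (fun a => ((fun i => decide (i < (j : Int))) ∘ Prod.fst) a && a.2 == v) = 0 := by
    rw [List.countP_eq_zero]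
    rintro p hp
    obtain ⟨k, hk, rfl⟩ := (PySem.List.mem_enumerate_iff _ _ _).1 hp
    simp only [Function.comp_apply, Bool.and_eq_true, decide_eq_true_eq]
    rintro ⟨h, _⟩
    rw [List.length_take] at h
    omega
  rw [h1, h2]
  omega

/-- Effect of one group's scattered writes. -/
lemma groupB_length (g : List Int) :
    ∀ (acc : List Int) (k : Int),
      (solveOverlapGroupB acc (PySem.List.enumerate g k)).length = acc.length := by
  induction g with
  | nil => intro acc k; simp [PySem.List.enumerate, solveOverlapGroupB]
  | cons i g ih =>
    intro acc k
    rw [PySem.List.enumerate_cons]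
    simp only [solveOverlapGroupB]
    rw [ih, PySem.List.length_pySetD]

/-- Effect of one group's scattered writes: position `j` gains `10 * (k + rank)`
where rank = how many of the (strictly increasing) indices are below `j`. -/
lemma groupB_getElem (g : List Int) :
    ∀ (acc : List Int) (k : Int), g.Pairwise (· < ·) →
      (∀ i ∈ g, 0 ≤ i ∧ i < (acc.length : Int)) →
      ∀ (j : Nat) (hj : j < acc.length),
        (solveOverlapGroupB acc (PySem.List.enumerate g k))[j]?
          = some (if (j : Int) ∈ g
            then acc[j] + 10 * (k + (g.countP (fun i => i < (j : Int)) : Int))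
            else acc[j]) := by
  induction g with
  | nil =>
    intro acc k _ _ j hj
    simp [PySem.List.enumerate, solveOverlapGroupB, List.getElem?_eq_getElem hj]
  | cons i g ih =>
    intro acc k hpw hb j hj
    have hi := hb i (List.mem_cons_self ..)
    have hgt : ∀ x ∈ g, i < x := (List.pairwise_cons.1 hpw).1
    rw [PySem.List.enumerate_cons]
    simp only [solveOverlapGroupB]
    rw [PySem.List.pySetD_of_nonneg _ _ hi.1]
    set acc' := acc.set i.toNat (PySem.List.pyGetD acc i 0 + 10 * k) with hacc'
    have hlen' : acc'.length = acc.length := by simp [hacc']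
    rw [ih acc' (k + 1) (List.pairwise_cons.1 hpw).2
      (fun x hx => by rw [hlen']; exact hb x (List.mem_cons_of_mem _ hx)) j (by omega)]
    congr 1
    by_cases hji : (j : Int) = i
    · have hjg : (j : Int) ∉ g := fun h => by have := hgt _ h; omega
      have hcnt : g.countP (fun x => x < (j : Int)) = 0 := by
        rw [List.countP_eq_zero]
        intro x hx
        have := hgt x hx
        simp only [decide_eq_true_eq]
        omega
      have hmem : (j : Int) ∈ i :: g := by simp [hji]
      rw [if_neg hjg, if_pos hmem]
      have hij : i.toNat = j := by omega
      have hset : acc'[j]'(by omega) = PySem.List.pyGetD acc i 0 + 10 * k := by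
        simp only [hacc', List.getElem_set]
        simp [hij]
      rw [hset, PySem.List.pyGetD_eq_getElem _ _ hi.1 (by omega)]
      have hcnt2 : List.countP (fun x => decide (x < (j : Int))) (i :: g) = 0 := by
        rw [List.countP_cons, hcnt]
        simp
        omega
      rw [hcnt2]
      simp only [hij]
      push_cast
      ring
    · have hset : acc'[j]'(by omega) = acc[j] := by
        have hne : ¬ i.toNat = j := by omega
        simp only [hacc', List.getElem_set]
        simp [hne]
      rw [hset]
      by_cases hjg : (j : Int) ∈ g
      · have hmem : (j : Int) ∈ i :: g := List.mem_cons_of_mem _ hjg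
        rw [if_pos hjg, if_pos hmem]
        have hij : i < (j : Int) := hgt _ hjg
        rw [List.countP_cons]
        simp only [decide_eq_true_eq, hij, if_pos]
        push_cast
        ring
      · have hmem : (j : Int) ∉ i :: g := by
          simp only [List.mem_cons]
          rintro (h | h)
          · exact hji h
          · exact hjg h
        rw [if_neg hjg, if_neg hmem]

lemma foldB_length (vs : List Int) (t : List Int) :
    ∀ (acc : List Int),
      (vs.foldl (fun a v => solveOverlapGroupB a (PySem.List.enumerate (idxList t v) 0)) acc).length
        = acc.length := by
  induction vs with
  | nil => intro acc; rfl
  | cons v vs ih =>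
    intro acc
    rw [List.foldl_cons, ih, groupB_length]

lemma mem_idxList_iff (t : List Int) (v : Int) (j : Nat) (hj : j < t.length) :
    (j : Int) ∈ idxList t v ↔ t[j] = v := by
  rw [mem_idxList]
  constructor
  · rintro ⟨k, hk, hjk, hv⟩
    have : k = j := by omega
    subst this
    exact hv
  · intro hv
    exact ⟨j, hj, rfl, hv⟩

/-- Effect of folding all groups, for a Nodup value list. -/
lemma foldB_getElem (vs : List Int) (t : List Int) :
    ∀ (acc : List Int), vs.Nodup → ∀ (hacc : acc.length = t.length),
      ∀ (j : Nat) (hj : j < t.length),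
        (vs.foldl (fun a v => solveOverlapGroupB a (PySem.List.enumerate (idxList t v) 0)) acc)[j]?
          = some (if t[j] ∈ vs
            then acc[j]'(by omega) + 10 * ((idxList t t[j]).countP (fun i => i < (j : Int)) : Int)
            else acc[j]'(by omega)) := by
  induction vs with
  | nil =>
    intro acc _ hacc j hj
    simp [List.getElem?_eq_getElem (show j < acc.length by omega)]
  | cons v vs ih =>
    intro acc hnd hacc j hj
    have hb : ∀ i ∈ idxList t v, 0 ≤ i ∧ i < (acc.length : Int) := by
      intro i hi
      obtain ⟨k, hk, rfl, _⟩ := (mem_idxList t v i).1 hi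
      constructor
      · positivity
      · rw [hacc]; omega
    rw [List.foldl_cons]
    set acc' := solveOverlapGroupB acc (PySem.List.enumerate (idxList t v) 0) with hdef
    have hlen' : acc'.length = acc.length := groupB_length _ _ _
    rw [ih acc' hnd.of_cons (hlen'.trans hacc) j hj]
    congr 1
    have hgroup : acc'[j]'(by omega)
        = if (j : Int) ∈ idxList t v
          then acc[j]'(by omega) + 10 * (0 + ((idxList t v).countP (fun i => i < (j : Int)) : Int))
          else acc[j]'(by omega) := by
      have h2 := groupB_getElem (idxList t v) acc 0 (pairwise_idxList t v) hb j (by omega)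
      rw [← hdef] at h2
      rw [List.getElem?_eq_getElem (show j < acc'.length by omega)] at h2
      exact Option.some.inj h2
    by_cases hv : t[j] = v
    · have hnm : t[j] ∉ vs := by rw [hv]; exact (List.nodup_cons.1 hnd).1
      rw [if_neg hnm, if_pos (by simp [hv])]
      rw [hgroup, if_pos ((mem_idxList_iff t v j hj).2 hv), hv]
      ring_nf
    · by_cases hmem : t[j] ∈ vs
      · rw [if_pos hmem, if_pos (List.mem_cons_of_mem _ hmem)]
        rw [hgroup, if_neg (fun h => hv ((mem_idxList_iff t v j hj).1 h))]
      · rw [if_neg hmem, if_neg (by simp [hv, hmem])]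
        rw [hgroup, if_neg (fun h => hv ((mem_idxList_iff t v j hj).1 h))]

/-- The grouping dict's entry for `v` is exactly the positions of `v`. -/
lemma dictB_getD (t : List Int) (v : Int) :
    ((PySem.List.enumerate t 0).foldl
        (fun d p => d.modify p.2 [] (· ++ [p.1])) PySem.Dict.empty).getD v []
      = idxList t v := by
  have hswap : (PySem.List.enumerate t 0).foldl
        (fun d p => d.modify p.2 [] (· ++ [p.1])) PySem.Dict.empty
      = ((PySem.List.enumerate t 0).map Prod.swap).foldl
        (fun d p => d.modify p.1 [] (· ++ [p.2])) PySem.Dict.empty := by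
    rw [List.foldl_map]
    simp
  rw [hswap, PySem.Dict.getD_foldl_modify_append, PySem.Dict.getD_empty]
  unfold idxList
  rw [List.filter_map, List.map_map]
  simp [Function.comp_def]

lemma dictB_values (t : List Int) :
    ((PySem.List.enumerate t 0).foldl
        (fun d p => d.modify p.2 [] (· ++ [p.1])) PySem.Dict.empty).values
      = (PySem.Set.ofList t).map (fun v => idxList t v) := by
  set d := (PySem.List.enumerate t 0).foldl
      (fun d p => d.modify p.2 [] (· ++ [p.1])) PySem.Dict.empty with hd
  have hkeys : d.keys = PySem.Set.ofList t := by
    rw [hd, PySem.Dict.keys_foldl_modify_key]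
    rw [PySem.Dict.keys_empty, PySem.Set.update_nil_left, PySem.List.map_snd_enumerate]
  have hnd : d.keys.Nodup := by
    rw [hkeys]; exact PySem.Set.nodup_ofList t
  rw [PySem.Dict.values_eq_map_keys d hnd [], hkeys]
  apply List.map_congr_left
  intro v _
  rw [hd]
  exact dictB_getD t v

lemma altB_eq_fold (t : List Int) :
    solve_overlap_alt t
      = (PySem.Set.ofList t).foldl
          (fun a v => solveOverlapGroupB a (PySem.List.enumerate (idxList t v) 0)) t := by
  show ((PySem.List.enumerate t 0).foldl
        (fun d p => d.modify p.2 [] (· ++ [p.1])) PySem.Dict.empty).values.foldl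
      (fun acc idxs => solveOverlapGroupB acc (PySem.List.enumerate idxs 0)) t = _
  rw [dictB_values t, List.foldl_map]

lemma goA_eq_goB (rest : List Int) :
    ∀ pre : List Int,
      (∀ x ∈ pre ++ rest, ∀ y ∈ pre ++ rest, x % 10 = y % 10 → x = y) →
      goA pre rest = goB pre rest := by
  induction rest with
  | nil => intro pre _; rfl
  | cons x rest ih =>
    intro pre h
    simp only [goA, goB]
    congr 1
    · have hcnt : List.countP (fun y => y % 10 == x % 10) pre = List.count x pre := by
        rw [List.count_eq_countP]
        apply List.countP_congr
        intro y hy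
        simp only [beq_iff_eq]
        constructor
        · intro hres; exact h y (by simp [hy]) x (by simp) hres
        · rintro rfl; rfl
      rw [hcnt]
    · apply ih (pre ++ [x])
      intro a ha b hb
      apply h a ?_ b ?_ <;>
        · simp only [List.append_assoc, List.mem_append, List.mem_cons,
            List.singleton_append] at *
          tauto

-- length / getElem characterizations, for the tightness theorem
lemma length_goA (rest : List Int) : ∀ pre, (goA pre rest).length = rest.length := by
  induction rest with
  | nil => intro; rfl
  | cons x rest ih => intro pre; simp [goA, ih]

lemma length_goB (rest : List Int) : ∀ pre, (goB pre rest).length = rest.length := by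
  induction rest with
  | nil => intro; rfl
  | cons x rest ih => intro pre; simp [goB, ih]

lemma getElem_goA (rest : List Int) :
    ∀ (pre : List Int) (j : Nat) (hj : j < rest.length),
      (goA pre rest)[j]'(by rw [length_goA]; exact hj)
        = rest[j] + 10 * ((pre ++ rest.take j).countP (fun y => y % 10 == rest[j] % 10) : Int) := by
  induction rest with
  | nil => intro _ j hj; simp at hj
  | cons x rest ih =>
    intro pre j hj
    cases j with
    | zero => simp [goA]
    | succ j =>
      simp only [goA, List.getElem_cons_succ, List.take_succ_cons]
      rw [ih (pre ++ [x]) j (by simpa using hj)]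
      simp [List.append_assoc]

lemma getElem_goB (rest : List Int) :
    ∀ (pre : List Int) (j : Nat) (hj : j < rest.length),
      (goB pre rest)[j]'(by rw [length_goB]; exact hj)
        = rest[j] + 10 * ((pre ++ rest.take j).count rest[j] : Int) := by
  induction rest with
  | nil => intro _ j hj; simp at hj
  | cons x rest ih =>
    intro pre j hj
    cases j with
    | zero => simp [goB]
    | succ j =>
      simp only [goB, List.getElem_cons_succ, List.take_succ_cons]
      rw [ih (pre ++ [x]) j (by simpa using hj)]
      simp [List.append_assoc]

lemma portB_eq_goB (t : List Int) : solve_overlap_alt t = goB [] t := by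
  rw [altB_eq_fold t]
  apply List.ext_getElem?
  intro j
  by_cases hj : j < t.length
  · rw [foldB_getElem (PySem.Set.ofList t) t t (PySem.Set.nodup_ofList t) rfl j hj]
    rw [List.getElem?_eq_getElem (show j < (goB [] t).length by rw [length_goB]; exact hj)]
    rw [getElem_goB t [] j hj]
    rw [if_pos ((PySem.Set.mem_ofList _ _).2 (t.getElem_mem hj))]
    rw [countP_idxList t t[j] j (by omega)]
    simp

  · rw [List.getElem?_eq_none (by rw [foldB_length]; omega),
      List.getElem?_eq_none (by rw [length_goB]; omega)]

lemma count_lt_countP (l : List Int) (v w : Int) (hw : w ∈ l) (hne : w ≠ v)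
    (hres : w % 10 = v % 10) :
    l.count v < l.countP (fun y => y % 10 == v % 10) := by
  induction l with
  | nil => simp at hw
  | cons a l ih =>
    rw [List.count_cons, List.countP_cons]
    rcases List.mem_cons.mp hw with h | h
    · subst h
      have h1 : (w == v) = false := by simp [hne]
      have h2 : (w % 10 == v % 10) = true := by simp [hres]
      rw [h1, h2]
      simp only [if_false, if_true, Bool.false_eq_true]
      have : l.count v ≤ l.countP (fun y => y % 10 == v % 10) := by
        rw [List.count_eq_countP]
        apply List.countP_mono_left
        intro y _ hy
        simp only [beq_iff_eq] at *
        subst hy; rfl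
      omega
    · have := ih h
      by_cases hav : a = v
      · subst hav
        simp
        omega
      · have h1 : (a == v) = false := by simp [hav]
        rw [h1]
        simp only [Bool.false_eq_true, if_false, add_zero]
        split <;> omega

/-- Inside D_, at the later index of an aliasing pair A's residue count strictly
exceeds B's exact count, so the outputs differ. -/
lemma tight_aux (t : List Int) (i j : Nat) (hi : i < t.length) (hj : j < t.length)
    (hlt : i < j) (hne : t[i] ≠ t[j]) (hres : t[i] % 10 = t[j] % 10) :
    goA [] t ≠ goB [] t := by
  intro heq
  have hgj : (goA [] t)[j]'(by rw [length_goA]; exact hj)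
      = (goB [] t)[j]'(by rw [length_goB]; exact hj) := List.getElem_of_eq heq _
  rw [getElem_goA t [] j hj, getElem_goB t [] j hj] at hgj
  simp only [List.nil_append, add_right_inj] at hgj
  have hmem : t[i] ∈ t.take j :=
    List.mem_take_iff_getElem.mpr ⟨i, by omega, rfl⟩
  have := count_lt_countP (t.take j) t[j] t[i] hmem hne hres
  omega

-- ===== VERDICT (by name: the statement is the Claim_ definition above) =====
theorem solve_overlap_spec : Claim_unchanged_solve_overlap := by
  intro t _ hpre hnd
  rw [portA_eq_goA t hpre, portB_eq_goB t]
  apply goA_eq_goB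
  intro x hx y hy hres
  simp only [List.nil_append] at hx hy
  by_contra hne
  exact hnd ⟨x, hx, y, hy, hne, hres⟩

theorem solve_overlap_changed : Claim_changed_solve_overlap := by
  unfold Claim_changed_solve_overlap; decide

theorem solve_overlap_tight : Claim_exact_solve_overlap := by
  intro t _ hpre hd
  obtain ⟨x, hx, y, hy, hne, hres⟩ := hd
  obtain ⟨i, hi, rfl⟩ := List.getElem_of_mem hx
  obtain ⟨j, hj, rfl⟩ := List.getElem_of_mem hy
  rw [portA_eq_goA t hpre, portB_eq_goB t]
  rcases Nat.lt_or_ge i j with hlt | hge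
  · exact tight_aux t i j hi hj hlt hne hres
  · have hlt : j < i := by
      rcases Nat.lt_or_ge j i with h | h
      · exact h
      · exfalso; apply hne; congr 1; omega
    exact tight_aux t j i hj hi hlt (fun h => hne h.symm) hres.symm
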